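-- pv_equiv track=rewrite | github.com/gubenkoved/daily-coding-problem | python/dcp_316_coins.py | solve
-- ===== SOURCE A (Python) =====
-- from typing import Iterable
--
-- def solve(a: Iterable[int]):
--     cur = [0 for _ in a]
--     coins = set()
--     for idx in range(1, len(a)):
--         if a[idx] - cur[idx] == 1:
--             coins.add(idx)
--             # mark every i-th as reachable (like in eratosphen sieve)
--             for i in range(idx, len(a), idx):
--                 cur[i] += 1
--         elif a[idx] - cur[idx] != 0:
--             return None
--     return coins
-- ===== SOURCE B (Python) =====
-- from typing import Iterable
--
-- def solve(a: Iterable[int]):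
--     # No sieve array and no indexing into a: walk the tail of the list
--     # element by element with a running index, counting for each position
--     # the already-selected coins that divide it.
--     items = list(a)
--     coins = []
--     idx = 1
--     for v in items[1:]:
--         need = v - sum(1 for d in coins if idx % d == 0)
--         if need == 1:
--             coins.append(idx)
--         elif need != 0:
--             return None
--         idx += 1
--     return set(coins)
-- ===== Notes on version B (the rewrite author's own statement) =====
-- stated objective: simpler
-- what changed: Replaces the Eratosthenes-style sieve array (cur, bumped at every multiple of each new coin) and index-based access by a single element-wise walk over the tail of the list with a running index, counting at each position the already-selected coins that divide it; the auxiliary array disappears.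
import Mathlib
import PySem

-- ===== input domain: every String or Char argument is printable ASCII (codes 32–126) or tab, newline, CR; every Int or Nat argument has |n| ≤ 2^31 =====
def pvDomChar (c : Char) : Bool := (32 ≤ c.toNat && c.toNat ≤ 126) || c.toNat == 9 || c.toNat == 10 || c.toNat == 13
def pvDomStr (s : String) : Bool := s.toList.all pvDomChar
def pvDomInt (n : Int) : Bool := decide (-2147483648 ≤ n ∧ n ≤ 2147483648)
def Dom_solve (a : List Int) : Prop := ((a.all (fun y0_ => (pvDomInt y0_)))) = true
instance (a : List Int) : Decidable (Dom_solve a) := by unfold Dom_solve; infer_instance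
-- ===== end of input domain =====

-- B removes A's sieve array and index arithmetic: it walks the tail of the list element by
-- element with a running index, counting the already-selected coins dividing each position;
-- objective: simpler.

-- ===== PORT A =====
-- inner loop 'for i in range(idx, len(a), idx): cur[i] += 1'  (indices are always ≥ 1, in range)
def solveMark (cur : List Int) (idx n : Int) : List Int :=
  (PySem.List.pyRange idx n idx).foldl
    (fun c i => PySem.List.pySetD c i (PySem.List.pyGetD c i 0 + 1)) cur

-- main loop 'for idx in range(1, len(a)): …' with early return None
def solveLoop (a : List Int) : List Int → List Int → PySem.Set Int → Option (List Int)
  | [], _, coins => some coins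
  | idx :: rest, cur, coins =>
    if PySem.List.pyGetD a idx 0 - PySem.List.pyGetD cur idx 0 == 1 then
      solveLoop a rest (solveMark cur idx (a.length : Int)) (PySem.Set.add coins idx)
    else if PySem.List.pyGetD a idx 0 - PySem.List.pyGetD cur idx 0 != 0 then none
    else solveLoop a rest cur coins

def solve (a : List Int) : Option (List Int) :=
  solveLoop a (PySem.List.pyRange 1 (a.length : Int) 1) (a.map (fun _ => 0)) PySem.Set.empty

-- ===== PORT B =====
-- 'for v in items[1:]: need = v - sum(1 for d in coins if idx % d == 0); …; idx += 1'
def solveAltGo : List Int → Int → List Int → Option (List Int)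
  | [], _, coins => some (PySem.Set.ofList coins)
  | v :: rest, idx, coins =>
    let need := v - (coins.countP (fun d => PySem.Int.mod idx d == 0) : Int)
    if need == 1 then solveAltGo rest (idx + 1) (coins ++ [idx])
    else if need != 0 then none
    else solveAltGo rest (idx + 1) coins

def solve_alt (a : List Int) : Option (List Int) := solveAltGo (a.drop 1) 1 []

-- ===== PRECONDITION & SPEC =====
def Spec_solve (a : List Int) (out : Option (List Int)) : Prop := out = solve_alt a
instance (a : List Int) (out : Option (List Int)) : Decidable (Spec_solve a out) := by unfold Spec_solve; infer_instance

-- ===== CLAIM (what is proved, stated in full; the proofs are below) =====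
def Claim_equal_solve : Prop := ∀ (a : List Int), Dom_solve a → Spec_solve a (solve a)

-- ===== LEMMAS AND PROOFS =====

-- number of selected coins dividing j
def coinCount (coins : List Int) (j : Int) : Int :=
  (coins.countP (fun d => PySem.Int.mod j d == 0) : Int)

-- proof-only intermediate form: B's loop driven by the index list instead of the tail of a
def altIdx (a : List Int) : List Int → List Int → Option (List Int)
  | [], coins => some (PySem.Set.ofList coins)
  | idx :: rest, coins =>
    if PySem.List.pyGetD a idx 0 - coinCount coins idx == 1 then
      altIdx a rest (coins ++ [idx])
    else if PySem.List.pyGetD a idx 0 - coinCount coins idx != 0 then none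
    else altIdx a rest coins

theorem length_foldl_pySetD (L : List Int) (cur : List Int) :
    (L.foldl (fun c i => PySem.List.pySetD c i (PySem.List.pyGetD c i 0 + 1)) cur).length
      = cur.length := by
  induction L generalizing cur with
  | nil => rfl
  | cons i L ih => simp [List.foldl_cons, ih, PySem.List.length_pySetD]

theorem pyGetD_foldl_incr (L : List Int) (cur : List Int) (j : Int)
    (hL : ∀ i ∈ L, 0 ≤ i ∧ i < (cur.length : Int)) (hj0 : 0 ≤ j) (hj : j < (cur.length : Int)) :
    PySem.List.pyGetD (L.foldl (fun c i => PySem.List.pySetD c i (PySem.List.pyGetD c i 0 + 1)) cur) j 0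
      = PySem.List.pyGetD cur j 0 + (L.count j : Int) := by
  induction L generalizing cur with
  | nil => simp
  | cons i L ih =>
    obtain ⟨hi0, hin⟩ := hL i (by simp)
    have hlen : (PySem.List.pySetD cur i (PySem.List.pyGetD cur i 0 + 1)).length = cur.length :=
      PySem.List.length_pySetD _ _ _
    have hrec := ih (PySem.List.pySetD cur i (PySem.List.pyGetD cur i 0 + 1))
      (fun x hx => by rw [hlen]; exact hL x (by simp [hx])) (by rw [hlen]; exact hj)
    rw [List.foldl_cons, hrec]
    have hji : j = ((j.toNat : Nat) : Int) := by omega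
    have hii : i = ((i.toNat : Nat) : Int) := by omega
    rw [hji, hii, PySem.List.pyGetD_pySetD_natCast _ _ _ _ _ (by omega)]
    rw [List.count_cons]
    by_cases h : j.toNat = i.toNat
    · simp only [h, reduceIte]
      have : i = j := by omega
      simp [this]
      ring
    · rw [if_neg h]
      have hij : (i == j) = false := by
        simp only [beq_eq_false_iff_ne, ne_eq]
        omega
      simp
      omega

theorem count_pyRange_mul (idx n j : Int) (hidx : 0 < idx) (hj : idx < j) (hjn : j < n) :
    ((PySem.List.pyRange idx n idx).count j : Int)
      = (if PySem.Int.mod j idx == 0 then (1:Int) else 0) := by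
  have hnd : (PySem.List.pyRange idx n idx).Nodup := by
    rw [PySem.List.pyRange_of_pos _ _ hidx]
    refine List.Nodup.map (fun x y hxy => ?_) List.nodup_range
    have h' : idx * (x : Int) = idx * (y : Int) := by linarith
    have := mul_left_cancel₀ (by omega : idx ≠ 0) h'
    exact_mod_cast this
  have hmem : j ∈ PySem.List.pyRange idx n idx ↔ idx ∣ j := by
    rw [PySem.List.mem_pyRange_iff_of_pos hidx]
    constructor
    · rintro ⟨-, -, d⟩
      have := dvd_add d (dvd_refl idx)
      simpa using this
    · intro d
      exact ⟨le_of_lt hj, hjn, dvd_sub d (dvd_refl idx)⟩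
  by_cases h : idx ∣ j
  · rw [List.count_eq_one_of_mem hnd (hmem.mpr h)]
    simp [PySem.Int.mod_eq_zero_iff_dvd, h]
  · rw [List.count_eq_zero_of_not_mem (fun hm => h (hmem.mp hm))]
    simp [PySem.Int.mod_eq_zero_iff_dvd, h]

theorem coinCount_append (coins : List Int) (idx j : Int) :
    coinCount (coins ++ [idx]) j
      = coinCount coins j + (if PySem.Int.mod j idx == 0 then (1:Int) else 0) := by
  unfold coinCount
  rw [List.countP_append]
  by_cases h : PySem.Int.mod j idx == 0 <;> simp [h]

-- A's loop agrees with the index-driven form of B's loop under the sieve invariant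
theorem loop_eq (a : List Int) (rest : List Int) :
    ∀ (cur : List Int) (coins : List Int),
    cur.length = a.length →
    coins.Nodup →
    (∀ d ∈ coins, d ∉ rest) →
    rest.Pairwise (· < ·) →
    (∀ j ∈ rest, 0 < j ∧ j < (a.length : Int)) →
    (∀ j ∈ rest, PySem.List.pyGetD cur j 0 = coinCount coins j) →
    solveLoop a rest cur coins = altIdx a rest coins := by
  induction rest with
  | nil =>
    intro cur coins _ hnd _ _ _ _
    simp only [solveLoop, altIdx]
    exact congrArg some (PySem.Set.ofList_eq_self_of_nodup coins hnd).symm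
  | cons idx rest ih =>
    intro cur coins hlen hnd hdisj hsort hrange hcur
    obtain ⟨hidx0, hidxn⟩ := hrange idx (by simp)
    have hcuridx : PySem.List.pyGetD cur idx 0 = coinCount coins idx := hcur idx (by simp)
    have hlt : ∀ j ∈ rest, idx < j := (List.pairwise_cons.mp hsort).1
    have hsort' := (List.pairwise_cons.mp hsort).2
    rw [solveLoop, altIdx, hcuridx]
    by_cases h1 : PySem.List.pyGetD a idx 0 - coinCount coins idx == 1
    · simp only [h1, if_pos]
      have hnotmem : idx ∉ coins := fun hm => hdisj idx hm (by simp)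
      have hadd : PySem.Set.add coins idx = coins ++ [idx] := by
        simp [PySem.Set.add, PySem.Set.contains, hnotmem]
      rw [hadd]
      apply ih
      · rw [solveMark, length_foldl_pySetD, hlen]
      · refine List.Nodup.append hnd (List.nodup_singleton idx) ?_
        intro x hx hy
        simp only [List.mem_singleton] at hy
        subst hy; exact hnotmem hx
      · intro d hd
        rcases List.mem_append.mp hd with hd | hd
        · intro hm; exact hdisj d hd (by simp [hm])
        · simp at hd; subst hd
          exact fun hm => lt_irrefl _ (hlt _ hm)
      · exact hsort'
      · exact fun j hj => hrange j (by simp [hj])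
      · intro j hj
        obtain ⟨hj0, hjn⟩ := hrange j (by simp [hj])
        unfold solveMark
        rw [pyGetD_foldl_incr _ _ _
            (fun i hi => by
              rw [hlen]
              rw [PySem.List.mem_pyRange_iff_of_pos hidx0] at hi
              exact ⟨by omega, hi.2.1⟩)
            (le_of_lt hj0) (by omega)]
        rw [hcur j (by simp [hj]), count_pyRange_mul idx _ j hidx0 (hlt j hj) (by omega),
            coinCount_append]
    · rw [if_neg h1, if_neg h1]
      by_cases h2 : (PySem.List.pyGetD a idx 0 - coinCount coins idx != 0) = true
      · rw [if_pos h2, if_pos h2]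
      · rw [if_neg h2, if_neg h2]
        exact ih cur coins hlen hnd
          (fun d hd hm => hdisj d hd (by simp [hm]))
          hsort'
          (fun j hj => hrange j (by simp [hj]))
          (fun j hj => hcur j (by simp [hj]))

-- the index-driven form equals B's element-wise walk
theorem altIdx_eq_go (a : List Int) :
    ∀ (xs : List Int) (k : Int) (coins : List Int), 0 ≤ k → a.drop k.toNat = xs →
      altIdx a (PySem.List.pyRange k (a.length : Int) 1) coins = solveAltGo xs k coins := by
  intro xs
  induction xs with
  | nil =>
    intro k coins hk hdrop
    have hge : (a.length : Int) ≤ k := by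
      have := List.drop_eq_nil_iff.mp hdrop
      omega
    rw [PySem.List.pyRange_one_eq_nil hge]
    rfl
  | cons v rest ih =>
    intro k coins hk hdrop
    have hklt : k.toNat < a.length := by
      by_contra h
      rw [List.drop_eq_nil_of_le (by omega)] at hdrop
      simp at hdrop
    have hlt : k < (a.length : Int) := by omega
    have hv : PySem.List.pyGetD a k 0 = v := by
      have hget : a[k.toNat]? = some v := by
        have := congrArg List.head? hdrop
        rwa [List.head?_drop] at this
      have hki : k = ((k.toNat : Nat) : Int) := by omega
      rw [hki, PySem.List.pyGetD_natCast]
      simp [List.getD_eq_getElem?_getD, hget]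
    have hdrop' : a.drop (k + 1).toNat = rest := by
      have : (k + 1).toNat = k.toNat + 1 := by omega
      rw [this, ← List.drop_drop]
      rw [hdrop]
      rfl
    rw [PySem.List.pyRange_one_cons hlt, altIdx, hv]
    show _ = solveAltGo (v :: rest) k coins
    simp only [solveAltGo, coinCount]
    by_cases h1 : v - (coins.countP (fun d => PySem.Int.mod k d == 0) : Int) == 1
    · rw [if_pos h1, if_pos h1]
      exact ih (k + 1) (coins ++ [k]) (by omega) hdrop'
    · rw [if_neg h1, if_neg h1]
      by_cases h2 : (v - (coins.countP (fun d => PySem.Int.mod k d == 0) : Int) != 0) = true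
      · rw [if_pos h2, if_pos h2]
      · rw [if_neg h2, if_neg h2]
        exact ih (k + 1) coins (by omega) hdrop'

-- ===== VERDICT (by name: the statement is the Claim_ definition above) =====
theorem solve_spec : Claim_equal_solve := by
  intro a _
  unfold Spec_solve solve solve_alt
  rw [← altIdx_eq_go a (a.drop 1) 1 [] (by norm_num) (by norm_num)]
  apply loop_eq
  · simp
  · exact List.nodup_nil
  · simp
  · exact PySem.List.pairwise_lt_pyRange_one 1 _
  · intro j hj
    rw [PySem.List.mem_pyRange_one] at hj
    exact ⟨by omega, hj.2⟩
  · intro j hj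
    rw [PySem.List.mem_pyRange_one] at hj
    have : PySem.List.pyGetD (a.map (fun _ => (0:Int))) j 0 = 0 := by
      have hji : j = ((j.toNat : Nat) : Int) := by omega
      rw [hji, PySem.List.pyGetD_natCast]
      rcases Nat.lt_or_ge j.toNat a.length with h | h
      · simp [List.getD_eq_getElem?_getD]
      · simp [List.getD_eq_getElem?_getD]
    rw [this]
    simp [coinCount]
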